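-- pv_equiv track=rewrite | github.com/mssoftware-ms/07_OrderPilot-AI | src/ui/widgets/pattern_builder/pattern_to_cel.py | _apply_candle_offset
-- ===== SOURCE A (Python) =====
-- def _apply_candle_offset(condition: str, index: int) -> str:
--     """Apply candle index offset to condition.
--
--     Args:
--         condition: Base CEL condition
--         index: Candle index (negative for historical)
--
--     Returns:
--         Modified condition with candle() function
--     """
--     # Replace OHLC properties with candle(index).property
--     replacements = {
--         "open": f"candle({index}).open",
--         "high": f"candle({index}).high",
--         "low": f"candle({index}).low",
--         "close": f"candle({index}).close"
--     }
--
--     modified = condition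
--     # Sort by length (longest first) to avoid partial replacements
--     for prop in sorted(replacements.keys(), key=len, reverse=True):
--         modified = modified.replace(prop, replacements[prop])
--
--     return modified
-- ===== SOURCE B (Python) =====
-- def _apply_candle_offset(condition: str, index: int) -> str:
--     """Single left-to-right scan: replace each OHLC property occurrence in place."""
--     props = ("close", "open", "high", "low")
--     out = []
--     i = 0
--     n = len(condition)
--     while i < n:
--         for p in props:
--             if condition.startswith(p, i):
--                 out.append(f"candle({index}).{p}")
--                 i += len(p)
--                 break
--         else:
--             out.append(condition[i])
--             i += 1
--     return "".join(out)
-- ===== Notes on version B (the rewrite author's own statement) =====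
-- stated objective: alternative
-- what changed: Replaces four sequential full-string str.replace passes (building three intermediate strings) by one left-to-right scan that emits each candle(index).prop substitution in place; correct because the four property names start with distinct letters and the inserted text contains no property name.
import Mathlib
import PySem

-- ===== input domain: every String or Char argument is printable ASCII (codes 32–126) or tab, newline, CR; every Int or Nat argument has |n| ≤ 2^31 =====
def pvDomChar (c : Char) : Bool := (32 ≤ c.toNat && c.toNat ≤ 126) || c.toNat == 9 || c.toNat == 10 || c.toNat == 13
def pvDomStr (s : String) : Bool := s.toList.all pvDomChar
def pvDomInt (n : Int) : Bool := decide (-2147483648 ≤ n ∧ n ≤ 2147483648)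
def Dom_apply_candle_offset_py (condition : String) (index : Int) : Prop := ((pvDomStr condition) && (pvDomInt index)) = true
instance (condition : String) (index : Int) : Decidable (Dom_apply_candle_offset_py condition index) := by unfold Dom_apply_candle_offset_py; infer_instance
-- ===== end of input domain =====

-- B replaces A's four sequential full-string str.replace passes by one left-to-right scan that
-- substitutes each property occurrence in place (objective: alternative single-pass algorithm).

-- ===== PORT A =====
-- A: dict of replacements, keys sorted by length (longest first), four sequential .replace passes.
def apply_candle_offset_py (condition : String) (index : Int) : String :=
  let replacements : PySem.Dict String String := PySem.Dict.mk
    [("open",  PySem.Str.join "" ["candle(", PySem.Int.toStr index, ").open"]),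
     ("high",  PySem.Str.join "" ["candle(", PySem.Int.toStr index, ").high"]),
     ("low",   PySem.Str.join "" ["candle(", PySem.Int.toStr index, ").low"]),
     ("close", PySem.Str.join "" ["candle(", PySem.Int.toStr index, ").close"])]
  (PySem.List.sorted replacements.keys (fun p => (PySem.Str.len p : Int)) true).foldl
    (fun modified prop => PySem.Str.replace modified prop (replacements.getD prop "")) condition

-- ===== PORT B =====
-- the replacement text candle(<index>).<prop> (B's f-string)
def pvRepl (index : Int) (p : List Char) : List Char :=
  "candle(".toList ++ PySem.Int.toChars index ++ ").".toList ++ p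

-- B's while-loop: one left-to-right scan; at each position try close/open/high/low, else copy the char.
def pvScanGo (index : Int) : List Char → List Char
  | [] => []
  | c :: t =>
    if "close".toList.isPrefixOf (c :: t) then pvRepl index "close".toList ++ pvScanGo index (t.drop 4)
    else if "open".toList.isPrefixOf (c :: t) then pvRepl index "open".toList ++ pvScanGo index (t.drop 3)
    else if "high".toList.isPrefixOf (c :: t) then pvRepl index "high".toList ++ pvScanGo index (t.drop 3)
    else if "low".toList.isPrefixOf (c :: t) then pvRepl index "low".toList ++ pvScanGo index (t.drop 2)
    else c :: pvScanGo index t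
termination_by l => l.length
decreasing_by all_goals simp [List.length_drop]

def apply_candle_offset_py_alt (condition : String) (index : Int) : String :=
  String.ofList (pvScanGo index condition.toList)

-- ===== PRECONDITION & SPEC =====
def Spec_apply_candle_offset_py (condition : String) (index : Int) (out : String) : Prop := out = apply_candle_offset_py_alt condition index
instance (condition : String) (index : Int) (out : String) : Decidable (Spec_apply_candle_offset_py condition index out) := by unfold Spec_apply_candle_offset_py; infer_instance

-- ===== CLAIM (what is proved, stated in full; the proofs are below) =====
def Claim_equal_apply_candle_offset_py : Prop := ∀ (condition : String) (index : Int), Dom_apply_candle_offset_py condition index → Spec_apply_candle_offset_py condition index (apply_candle_offset_py condition index)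

-- ===== LEMMAS AND PROOFS =====

-- structural form of PySem.Chars.replace for a nonempty pattern
def pvRep (old new : List Char) : List Char → List Char
  | [] => []
  | c :: t => if old.isPrefixOf (c :: t) then new ++ pvRep old new (t.drop (old.length - 1)) else c :: pvRep old new t
termination_by l => l.length
decreasing_by all_goals simp [List.length_drop]

lemma pv_go_eq (old new : List Char) (h : old ≠ []) :
    ∀ (fuel : Nat) (l acc : List Char), l.length ≤ fuel →
      PySem.Chars.replace.go old new fuel l acc = acc.reverse ++ pvRep old new l := by
  intro fuel
  induction fuel with
  | zero =>
    intro l acc hl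
    have : l = [] := by cases l <;> simp_all
    subst this
    rw [PySem.Chars.replace.go]; simp [pvRep]
  | succ n ih =>
    intro l acc hl
    cases l with
    | nil =>
      rw [PySem.Chars.replace.go]
      · simp [pvRep]
      · intro h; omega
    | cons c t =>
      rw [PySem.Chars.replace.go]
      by_cases hp : old.isPrefixOf (c :: t)
      · simp only [hp, if_true]
        obtain ⟨k, hk⟩ : ∃ k, old.length = k + 1 := ⟨old.length - 1, by cases old <;> simp_all⟩
        have hd : ((c :: t).drop old.length).length ≤ n := by
          simp only [List.length_drop, List.length_cons]; simp at hl; omega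
        rw [ih _ _ hd]
        rw [pvRep]
        simp [hp, hk, List.drop_succ_cons]
      · simp only [hp]
        have ht : t.length ≤ n := by simp at hl; omega
        rw [ih _ _ ht]
        rw [pvRep]
        simp [hp]

lemma pv_replace_eq (old new s : List Char) (h : old ≠ []) :
    PySem.Chars.replace s old new = pvRep old new s := by
  rw [PySem.Chars.replace]
  have : old.isEmpty = false := by cases old <;> simp_all
  rw [this]
  simp [pv_go_eq old new h s.length s [] le_rfl]

lemma pv_rep_pos (old new l : List Char) (hne : old ≠ []) (h : old <+: l) :
    pvRep old new l = new ++ pvRep old new (l.drop old.length) := by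
  obtain ⟨k, hk⟩ : ∃ k, old.length = k + 1 := ⟨old.length - 1, by cases old <;> simp_all⟩
  cases l with
  | nil =>
    exfalso
    have := h.length_le
    simp [hk] at this
  | cons c t =>
    rw [pvRep]
    rw [if_pos (by exact List.isPrefixOf_iff_prefix.mpr h)]
    simp [hk, List.drop_succ_cons]

lemma pv_rep_neg (old new : List Char) (c : Char) (t : List Char) (h : ¬ old <+: c :: t) :
    pvRep old new (c :: t) = c :: pvRep old new t := by
  rw [pvRep]
  rw [if_neg (by simp [List.isPrefixOf_iff_prefix]; exact h)]

lemma pv_not_prefix_append {old s : List Char} (h : ¬ old.take s.length <+: s) (y : List Char) :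
    ¬ old <+: s ++ y := by
  intro hp
  exact h (by simpa [List.take_left] using hp.take s.length)

def pvSafe (old a : List Char) : Prop := ∀ s, s <:+ a → s ≠ [] → ∀ y, ¬ old <+: s ++ y

lemma pv_safe_of_concrete (old a : List Char)
    (h : ∀ s ∈ a.tails, s ≠ [] → ¬ old.take s.length <+: s) : pvSafe old a := by
  intro s hs hne y
  exact pv_not_prefix_append (h s ((List.mem_tails s a).mpr hs) hne) y

lemma pv_safe_of_head (old : List Char) (c0 : Char) (ps : List Char) (h : old = c0 :: ps)
    (a : List Char) (ha : ∀ c ∈ a, c ≠ c0) : pvSafe old a := by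
  intro s hs hne y hp
  cases s with
  | nil => exact hne rfl
  | cons d s' =>
    subst h
    rw [List.cons_append, List.cons_prefix_cons] at hp
    exact ha d (hs.subset (by simp)) hp.1.symm

lemma pv_suffix_append (s a b : List Char) (h : s <:+ a ++ b) :
    s <:+ b ∨ ∃ s', s' <:+ a ∧ s' ≠ [] ∧ s = s' ++ b := by
  induction a with
  | nil => left; simpa using h
  | cons c a' ih =>
    rw [List.cons_append, List.suffix_cons_iff] at h
    rcases h with rfl | h
    · right; exact ⟨c :: a', List.suffix_refl _, by simp, by simp⟩
    · rcases ih h with h1 | ⟨s', hs', hne, rfl⟩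
      · exact Or.inl h1
      · exact Or.inr ⟨s', hs'.trans (List.suffix_cons c a'), hne, rfl⟩

lemma pv_safe_append (old a b : List Char) (h1 : pvSafe old a) (h2 : pvSafe old b) :
    pvSafe old (a ++ b) := by
  intro s hs hne y
  rcases pv_suffix_append s a b hs with h | ⟨s', hs', hne', rfl⟩
  · exact h2 s h hne y
  · rw [List.append_assoc]
    exact h1 s' hs' hne' (b ++ y)

lemma pv_passthrough (old new : List Char) (a : List Char) (h : pvSafe old a) :
    ∀ x, pvRep old new (a ++ x) = a ++ pvRep old new x := by
  induction a with
  | nil => simp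
  | cons c a' ih =>
    intro x
    rw [List.cons_append, pv_rep_neg old new c (a' ++ x)
      (h (c :: a') (List.suffix_refl _) (by simp) x)]
    rw [ih (fun s hs hne y => h s (hs.trans (List.suffix_cons c a')) hne y) x]
    simp

lemma pv_toDigitsCore_chars (fuel n : Nat) (ds : List Char) (hds : ∀ c ∈ ds, c.isDigit) :
    ∀ c ∈ Nat.toDigitsCore 10 fuel n ds, c.isDigit := by
  induction fuel generalizing n ds with
  | zero => simpa [Nat.toDigitsCore] using hds
  | succ f ih =>
    have hdig : (n % 10).digitChar.isDigit := by
      have h10 : n % 10 < 10 := Nat.mod_lt _ (by norm_num)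
      interval_cases h : n % 10 <;> decide
    rw [Nat.toDigitsCore]
    by_cases h0 : n / 10 = 0
    · simp only [h0, if_true]
      intro c hc
      rcases hc with _ | hc
      · exact hdig
      · exact hds c (by assumption)
    · simp only [h0, if_false]
      exact ih (n / 10) _ (by
        intro c hc
        rcases hc with _ | hc
        · exact hdig
        · exact hds c (by assumption))

lemma pv_toChars_chars (n : Int) : ∀ c ∈ PySem.Int.toChars n, c = '-' ∨ c.isDigit := by
  intro c hc
  rw [PySem.Int.toChars] at hc
  split at hc
  · rcases hc with _ | hc
    · exact Or.inl rfl
    · exact Or.inr (pv_toDigitsCore_chars _ _ [] (by simp) c (by assumption))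
  · exact Or.inr (pv_toDigitsCore_chars _ _ [] (by simp) c hc)

lemma pv_no_new (old new : List Char) (hold : old ≠ []) (hnew : new ≠ [])
    (p : List Char) (hfc : ∀ q, q <:+ p → q ≠ [] → q.head? ≠ new.head?) :
    ∀ t, ¬ p <+: t → ¬ p <+: pvRep old new t := by
  intro t
  induction t generalizing p with
  | nil =>
    intro h hp
    rw [pvRep] at hp
    have : p = [] := List.prefix_nil.mp hp
    subst this
    exact h (List.nil_prefix)
  | cons d t' ih =>
    intro h hp
    by_cases hpre : old <+: d :: t'
    · rw [pv_rep_pos old new _ hold hpre] at hp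
      cases p with
      | nil => exact h List.nil_prefix
      | cons p0 ps =>
        cases hn : new with
        | nil => exact hnew hn
        | cons n0 ns =>
          rw [hn, List.cons_append, List.cons_prefix_cons] at hp
          exact hfc (p0 :: ps) (List.suffix_refl _) (by simp) (by simp [hn, hp.1])
    · rw [pv_rep_neg old new d t' hpre] at hp
      cases p with
      | nil => exact h List.nil_prefix
      | cons p0 ps =>
        rw [List.cons_prefix_cons] at hp h
        obtain ⟨rfl, hp2⟩ := hp
        exact ih ps (fun q hq => hfc q (hq.trans (List.suffix_cons p0 ps)))
          (fun hps => h ⟨rfl, hps⟩) hp2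

lemma pv_safe_repl (index : Int) (old : List Char) (c0 : Char) (ps p : List Char)
    (holds : old = c0 :: ps) (hc0 : c0 ≠ '-') (hd : c0.isDigit = false)
    (h1 : ∀ s ∈ "candle(".toList.tails, s ≠ [] → ¬ old.take s.length <+: s)
    (h2 : ∀ s ∈ (").".toList ++ p).tails, s ≠ [] → ¬ old.take s.length <+: s) :
    pvSafe old (pvRepl index p) := by
  rw [pvRepl, List.append_assoc, List.append_assoc]
  refine pv_safe_append _ _ _ (pv_safe_of_concrete _ _ h1) ?_
  refine pv_safe_append _ _ _ ?_ (pv_safe_of_concrete _ _ h2)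
  refine pv_safe_of_head old c0 ps holds _ ?_
  intro c hc
  rcases pv_toChars_chars index c hc with rfl | hdig
  · exact fun he => hc0 he.symm
  · intro he
    subst he
    simp [hdig] at hd

lemma pv_safe_lit (old pat : List Char)
    (h : ∀ s ∈ pat.tails, s ≠ [] → ¬ old.take s.length <+: s) : pvSafe old pat :=
  pv_safe_of_concrete old pat h

lemma pv_no_new_repl (index : Int) (q : List Char) (hq : q ≠ []) (pat : List Char)
    (hfc : ∀ s ∈ pat.tails, s ≠ [] → s.head? ≠ some 'c') (t : List Char) (h : ¬ pat <+: t) :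
    ¬ pat <+: pvRep q (pvRepl index q) t := by
  refine pv_no_new q _ hq (by simp [pvRepl]) pat ?_ t h
  intro s hs hne
  have hc : (pvRepl index q).head? = some 'c' := by simp [pvRepl]
  rw [hc]
  exact hfc s ((List.mem_tails s pat).mpr hs) hne

lemma pv_main (index : Int) : ∀ (N : Nat) (l : List Char), l.length ≤ N →
    pvRep "low".toList (pvRepl index "low".toList)
      (pvRep "high".toList (pvRepl index "high".toList)
        (pvRep "open".toList (pvRepl index "open".toList)
          (pvRep "close".toList (pvRepl index "close".toList) l))) = pvScanGo index l := by
  have sROc : pvSafe "open".toList (pvRepl index "close".toList) :=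
    pv_safe_repl index _ 'o' _ _ rfl (by decide) (by decide) (by decide) (by decide)
  have sRHc : pvSafe "high".toList (pvRepl index "close".toList) :=
    pv_safe_repl index _ 'h' _ _ rfl (by decide) (by decide) (by decide) (by decide)
  have sRLc : pvSafe "low".toList (pvRepl index "close".toList) :=
    pv_safe_repl index _ 'l' _ _ rfl (by decide) (by decide) (by decide) (by decide)
  have sRHo : pvSafe "high".toList (pvRepl index "open".toList) :=
    pv_safe_repl index _ 'h' _ _ rfl (by decide) (by decide) (by decide) (by decide)
  have sRLo : pvSafe "low".toList (pvRepl index "open".toList) :=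
    pv_safe_repl index _ 'l' _ _ rfl (by decide) (by decide) (by decide) (by decide)
  have sRLh : pvSafe "low".toList (pvRepl index "high".toList) :=
    pv_safe_repl index _ 'l' _ _ rfl (by decide) (by decide) (by decide) (by decide)
  intro N
  induction N with
  | zero =>
    intro l hl
    have : l = [] := by cases l <;> simp_all
    subst this
    simp [pvRep, pvScanGo]
  | succ N ih =>
    intro l hl
    by_cases hcl : "close".toList <+: l
    · obtain ⟨r, rfl⟩ := hcl
      rw [pv_rep_pos "close".toList _ _ (by decide) (List.prefix_append _ _)]
      rw [List.drop_left]
      rw [pv_passthrough _ _ _ sROc, pv_passthrough _ _ _ sRHc, pv_passthrough _ _ _ sRLc]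
      rw [ih r (by simp at hl ⊢; omega)]
      rw [show ("close".toList ++ r) = 'c'::'l'::'o'::'s'::'e'::r from rfl]
      rw [pvScanGo]
      simp [List.isPrefixOf]
    · by_cases hop : "open".toList <+: l
      · obtain ⟨r, rfl⟩ := hop
        rw [pv_passthrough "close".toList _ _ (pv_safe_lit _ _ (by decide))]
        rw [pv_rep_pos "open".toList _ _ (by decide) (List.prefix_append _ _)]
        rw [List.drop_left]
        rw [pv_passthrough _ _ _ sRHo, pv_passthrough _ _ _ sRLo]
        rw [ih r (by simp at hl ⊢; omega)]
        rw [show ("open".toList ++ r) = 'o'::'p'::'e'::'n'::r from rfl]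
        rw [pvScanGo]
        simp [List.isPrefixOf]
      · by_cases hhi : "high".toList <+: l
        · obtain ⟨r, rfl⟩ := hhi
          rw [pv_passthrough "close".toList _ _ (pv_safe_lit _ _ (by decide))]
          rw [pv_passthrough "open".toList _ _ (pv_safe_lit _ _ (by decide))]
          rw [pv_rep_pos "high".toList _ _ (by decide) (List.prefix_append _ _)]
          rw [List.drop_left]
          rw [pv_passthrough _ _ _ sRLh]
          rw [ih r (by simp at hl ⊢; omega)]
          rw [show ("high".toList ++ r) = 'h'::'i'::'g'::'h'::r from rfl]
          rw [pvScanGo]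
          simp [List.isPrefixOf]
        · by_cases hlo : "low".toList <+: l
          · obtain ⟨r, rfl⟩ := hlo
            rw [pv_passthrough "close".toList _ _ (pv_safe_lit _ _ (by decide))]
            rw [pv_passthrough "open".toList _ _ (pv_safe_lit _ _ (by decide))]
            rw [pv_passthrough "high".toList _ _ (pv_safe_lit _ _ (by decide))]
            rw [pv_rep_pos "low".toList _ _ (by decide) (List.prefix_append _ _)]
            rw [List.drop_left]
            rw [ih r (by simp at hl ⊢; omega)]
            rw [show ("low".toList ++ r) = 'l'::'o'::'w'::r from rfl]
            rw [pvScanGo]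
            simp [List.isPrefixOf]
          · cases l with
            | nil => simp [pvRep, pvScanGo]
            | cons c t =>
              have e1 : pvRep "close".toList (pvRepl index "close".toList) (c :: t)
                  = c :: pvRep "close".toList (pvRepl index "close".toList) t :=
                pv_rep_neg _ _ _ _ hcl
              have h2 : ¬ "open".toList <+: c :: pvRep "close".toList (pvRepl index "close".toList) t := by
                rw [show "open".toList = 'o'::"pen".toList from rfl, List.cons_prefix_cons]
                rintro ⟨rfl, h⟩
                have hpen : ¬ "pen".toList <+: t := fun hp => hop (List.cons_prefix_cons.mpr ⟨rfl, hp⟩)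
                exact pv_no_new_repl index _ (by decide) _ (by decide) t hpen h
              have e2 : pvRep "open".toList (pvRepl index "open".toList)
                    (c :: pvRep "close".toList (pvRepl index "close".toList) t)
                  = c :: pvRep "open".toList (pvRepl index "open".toList)
                      (pvRep "close".toList (pvRepl index "close".toList) t) :=
                pv_rep_neg _ _ _ _ h2
              have h3 : ¬ "high".toList <+: c :: pvRep "open".toList (pvRepl index "open".toList)
                  (pvRep "close".toList (pvRepl index "close".toList) t) := by
                rw [show "high".toList = 'h'::"igh".toList from rfl, List.cons_prefix_cons]
                rintro ⟨rfl, h⟩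
                have higt : ¬ "igh".toList <+: t := fun hp => hhi (List.cons_prefix_cons.mpr ⟨rfl, hp⟩)
                exact pv_no_new_repl index _ (by decide) _ (by decide) _
                  (pv_no_new_repl index _ (by decide) _ (by decide) t higt) h
              have e3 : pvRep "high".toList (pvRepl index "high".toList)
                    (c :: pvRep "open".toList (pvRepl index "open".toList)
                      (pvRep "close".toList (pvRepl index "close".toList) t))
                  = c :: pvRep "high".toList (pvRepl index "high".toList)
                      (pvRep "open".toList (pvRepl index "open".toList)
                        (pvRep "close".toList (pvRepl index "close".toList) t)) :=
                pv_rep_neg _ _ _ _ h3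
              have h4 : ¬ "low".toList <+: c :: pvRep "high".toList (pvRepl index "high".toList)
                  (pvRep "open".toList (pvRepl index "open".toList)
                    (pvRep "close".toList (pvRepl index "close".toList) t)) := by
                rw [show "low".toList = 'l'::"ow".toList from rfl, List.cons_prefix_cons]
                rintro ⟨rfl, h⟩
                have howt : ¬ "ow".toList <+: t := fun hp => hlo (List.cons_prefix_cons.mpr ⟨rfl, hp⟩)
                exact pv_no_new_repl index _ (by decide) _ (by decide) _
                  (pv_no_new_repl index _ (by decide) _ (by decide) _
                    (pv_no_new_repl index _ (by decide) _ (by decide) t howt)) h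
              have e4 := pv_rep_neg "low".toList (pvRepl index "low".toList) _ _ h4
              rw [e1, e2, e3, e4]
              rw [ih t (by simp at hl ⊢; omega)]
              rw [pvScanGo]
              rw [if_neg (by simp only [List.isPrefixOf_iff_prefix]; exact hcl)]
              rw [if_neg (by simp only [List.isPrefixOf_iff_prefix]; exact hop)]
              rw [if_neg (by simp only [List.isPrefixOf_iff_prefix]; exact hhi)]
              rw [if_neg (by simp only [List.isPrefixOf_iff_prefix]; exact hlo)]

lemma pv_string_eq (a : String) (l : List Char) (h : a.toList = l) : a = String.ofList l := by
  subst h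
  exact String.ofList_toList.symm

-- ===== VERDICT (by name: the statement is the Claim_ definition above) =====
theorem apply_candle_offset_py_spec : Claim_equal_apply_candle_offset_py := by
  intro condition index _
  unfold Spec_apply_candle_offset_py apply_candle_offset_py apply_candle_offset_py_alt
  have hkeys : (PySem.Dict.mk
      [("open",  PySem.Str.join "" ["candle(", PySem.Int.toStr index, ").open"]),
       ("high",  PySem.Str.join "" ["candle(", PySem.Int.toStr index, ").high"]),
       ("low",   PySem.Str.join "" ["candle(", PySem.Int.toStr index, ").low"]),
       ("close", PySem.Str.join "" ["candle(", PySem.Int.toStr index, ").close"])] : PySem.Dict String String).keys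
      = ["open", "high", "low", "close"] := by simp [PySem.Dict.keys_mk]
  simp only [hkeys]
  rw [show PySem.List.sorted ["open", "high", "low", "close"] (fun p => (PySem.Str.len p : Int)) true
      = ["close", "open", "high", "low"] from by decide]
  simp only [List.foldl]
  have gmk : ∀ (k : String), (PySem.Dict.mk
      [("open",  PySem.Str.join "" ["candle(", PySem.Int.toStr index, ").open"]),
       ("high",  PySem.Str.join "" ["candle(", PySem.Int.toStr index, ").high"]),
       ("low",   PySem.Str.join "" ["candle(", PySem.Int.toStr index, ").low"]),
       ("close", PySem.Str.join "" ["candle(", PySem.Int.toStr index, ").close"])] : PySem.Dict String String).getD k ""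
      = (if k = "open" then PySem.Str.join "" ["candle(", PySem.Int.toStr index, ").open"]
         else if k = "high" then PySem.Str.join "" ["candle(", PySem.Int.toStr index, ").high"]
         else if k = "low" then PySem.Str.join "" ["candle(", PySem.Int.toStr index, ").low"]
         else if k = "close" then PySem.Str.join "" ["candle(", PySem.Int.toStr index, ").close"]
         else "") := by
    intro k
    simp only [PySem.Dict.getD_eq_get?_getD, PySem.Dict.get?_mk_cons]
    by_cases h1 : k = "open"
    · subst h1; simp
    by_cases h2 : k = "high"
    · subst h2; simp
    by_cases h3 : k = "low"
    · subst h3; simp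
    by_cases h4 : k = "close"
    · subst h4; simp
    simp [h1, h2, h3, h4, Ne.symm h1, Ne.symm h2, Ne.symm h3, Ne.symm h4, PySem.Dict.get?]
  simp only [gmk, reduceIte, String.reduceEq]
  have hjo : (PySem.Str.join "" ["candle(", PySem.Int.toStr index, ").open"]).toList = pvRepl index "open".toList := by
    simp [PySem.Str.toList_join, PySem.Chars.join, List.intercalate, List.intersperse,
      PySem.Int.toList_toStr, pvRepl]
  have hjh : (PySem.Str.join "" ["candle(", PySem.Int.toStr index, ").high"]).toList = pvRepl index "high".toList := by
    simp [PySem.Str.toList_join, PySem.Chars.join, List.intercalate, List.intersperse,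
      PySem.Int.toList_toStr, pvRepl]
  have hjl : (PySem.Str.join "" ["candle(", PySem.Int.toStr index, ").low"]).toList = pvRepl index "low".toList := by
    simp [PySem.Str.toList_join, PySem.Chars.join, List.intercalate, List.intersperse,
      PySem.Int.toList_toStr, pvRepl]
  have hjc : (PySem.Str.join "" ["candle(", PySem.Int.toStr index, ").close"]).toList = pvRepl index "close".toList := by
    simp [PySem.Str.toList_join, PySem.Chars.join, List.intercalate, List.intersperse,
      PySem.Int.toList_toStr, pvRepl]
  apply pv_string_eq
  simp only [PySem.Str.toList_replace, hjo, hjh, hjl, hjc]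
  rw [pv_replace_eq _ _ _ (by decide), pv_replace_eq _ _ _ (by decide),
    pv_replace_eq _ _ _ (by decide), pv_replace_eq _ _ _ (by decide)]
  exact pv_main index condition.toList.length condition.toList le_rfl
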